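-- pv_equiv track=rewrite | github.com/PedroCotovio/MLproject | AA_module/EDA_functions.py | breeds_check
-- ===== SOURCE A (Python) =====
-- def breeds_check(ls, off):
--     """
--     Check if a string represents a known animal breed
--
--     :param ls: list, strings to check
--     :param off: list, official breeds
--     :return: list, strings that are not breeds
--     """
--     not_breeds = []
--     for x in range(len(ls)):
--         temp = ls[x].split()
--         count = 0
--         for word in temp:
--             if word in ['DOG', 'CAT', 'BROWN'] or 'HAIR' in word:
--                 continue
--             for breed in off:
--                 if word in breed:
--                     count += 1
--         if count == 0:
--             not_breeds.append(ls[x])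
--     return not_breeds
-- ===== SOURCE B (Python) =====
-- def breeds_check(ls, off):
--     """
--     Check if a string represents a known animal breed
--
--     :param ls: list, strings to check
--     :param off: list, official breeds
--     :return: list, strings that are not breeds
--     """
--     subs = set()
--     for breed in off:
--         n = len(breed)
--         for i in range(n):
--             for j in range(i + 1, n + 1):
--                 subs.add(breed[i:j])
--     skip = {'DOG', 'CAT', 'BROWN'}
--     return [s for s in ls
--             if not any(w not in skip and 'HAIR' not in w and w in subs
--                        for w in s.split())]
-- ===== Notes on version B (the rewrite author's own statement) =====
-- stated objective: faster
-- what changed: B precomputes one hash set of all substrings of the official breeds and then tests each word with a single set lookup (with any()'s early exit), instead of A's rescan of every breed for every word of every string.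
import Mathlib
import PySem

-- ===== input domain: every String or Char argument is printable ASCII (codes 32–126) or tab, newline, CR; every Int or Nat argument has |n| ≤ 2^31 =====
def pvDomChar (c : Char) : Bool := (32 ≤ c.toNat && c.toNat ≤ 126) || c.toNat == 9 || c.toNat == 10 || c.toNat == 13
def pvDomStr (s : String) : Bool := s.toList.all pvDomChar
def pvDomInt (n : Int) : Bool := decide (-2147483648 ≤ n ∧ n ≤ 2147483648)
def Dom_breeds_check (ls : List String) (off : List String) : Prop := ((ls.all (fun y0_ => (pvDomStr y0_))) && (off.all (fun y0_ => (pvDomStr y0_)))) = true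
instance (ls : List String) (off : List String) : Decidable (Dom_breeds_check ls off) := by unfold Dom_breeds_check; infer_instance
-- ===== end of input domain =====

-- B precomputes the set of all (nonempty) substrings of the breeds once, then tests each word by
-- one set lookup with early exit (objective: faster; A rescans every breed for every word).

-- ===== PORT A =====
def breeds_check (ls : List String) (off : List String) : List String :=
  (PySem.List.pyRange 0 (PySem.List.len ls) 1).foldl (fun not_breeds x =>
    let temp := PySem.Str.split₀ (PySem.List.pyGetD ls x "")
    let count : Int := temp.foldl (fun count word =>
      if word ∈ ["DOG", "CAT", "BROWN"] ∨ PySem.Str.isIn "HAIR" word then count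
      else off.foldl (fun count breed =>
        if PySem.Str.isIn word breed then count + 1 else count) count) 0
    if count = 0 then not_breeds ++ [PySem.List.pyGetD ls x ""] else not_breeds) []

-- ===== PORT B =====
-- the two inner loops of B that add every substring breed[i:j] of one breed to the set
def pvAddSubs (subs : PySem.Set String) (breed : String) : PySem.Set String :=
  (PySem.List.pyRange 0 (PySem.Str.len breed) 1).foldl (fun subs i =>
    (PySem.List.pyRange (i + 1) (PySem.Str.len breed + 1) 1).foldl (fun subs j =>
      PySem.Set.add subs (PySem.Str.slice breed (some i) (some j))) subs) subs

def breeds_check_alt (ls : List String) (off : List String) : List String :=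
  let subs : PySem.Set String := off.foldl pvAddSubs PySem.Set.empty
  let skip : List String := ["DOG", "CAT", "BROWN"]
  ls.filter (fun s => !(PySem.Str.split₀ s).any (fun w =>
    decide (w ∉ skip) && !PySem.Str.isIn "HAIR" w && decide (w ∈ subs)))

-- ===== PRECONDITION & SPEC =====
def Spec_breeds_check (ls : List String) (off : List String) (out : List String) : Prop := out = breeds_check_alt ls off
instance (ls : List String) (off : List String) (out : List String) : Decidable (Spec_breeds_check ls off out) := by unfold Spec_breeds_check; infer_instance

-- ===== CLAIM (what is proved, stated in full; the proofs are below) =====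
def Claim_equal_breeds_check : Prop := ∀ (ls : List String) (off : List String), Dom_breeds_check ls off → Spec_breeds_check ls off (breeds_check ls off)

-- ===== LEMMAS AND PROOFS =====

-- one summand of A's count, as added per word
def pvTerm (off : List String) (w : String) : Int :=
  if w ∈ ["DOG", "CAT", "BROWN"] ∨ PySem.Str.isIn "HAIR" w then 0
  else ((off.countP (fun breed => PySem.Str.isIn w breed) : Nat) : Int)

-- every word produced by str.split() is nonempty
theorem split₀_go_ne_nil (s : List Char) : ∀ (cur : List Char) (acc : List (List Char)),
    (∀ w ∈ acc, w ≠ []) → ∀ w ∈ PySem.Chars.split₀.go s cur acc, w ≠ [] := by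
  induction s with
  | nil =>
    intro cur acc hacc w hw
    by_cases hc : cur.isEmpty
    · simp only [PySem.Chars.split₀.go, hc, if_true] at hw
      exact hacc w (List.mem_reverse.mp hw)
    · simp only [PySem.Chars.split₀.go, hc, if_false, Bool.false_eq_true] at hw
      rcases List.mem_cons.mp (List.mem_reverse.mp hw) with h | h
      · subst h
        simpa [List.isEmpty_iff] using hc
      · exact hacc w h
  | cons c rest ih =>
    intro cur acc hacc w hw
    by_cases hs : PySem.Chars.isspace c
    · by_cases hc : cur.isEmpty
      · simp only [PySem.Chars.split₀.go, hs, hc, if_true] at hw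
        exact ih [] acc hacc w hw
      · simp only [PySem.Chars.split₀.go, hs, hc, if_true, Bool.false_eq_true, if_false] at hw
        refine ih [] (cur.reverse :: acc) ?_ w hw
        intro v hv
        rcases List.mem_cons.mp hv with h | h
        · subst h
          simpa [List.isEmpty_iff] using hc
        · exact hacc v h
    · simp only [PySem.Chars.split₀.go, hs, Bool.false_eq_true, if_false] at hw
      exact ih (c :: cur) acc hacc w hw

theorem mem_split₀_ne_nil (s w : String) (h : w ∈ PySem.Str.split₀ s) : w.toList ≠ [] := by
  simp only [PySem.Str.split₀, List.mem_map] at h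
  obtain ⟨l, hl, rfl⟩ := h
  have : l ≠ [] := split₀_go_ne_nil s.toList [] [] (by simp) l hl
  simp [this]

-- membership through a fold that only adds elements characterised by Q
theorem mem_foldl_of_step {α : Type} (l : List α) (F : PySem.Set String → α → PySem.Set String)
    (Q : α → String → Prop)
    (hF : ∀ s a w, w ∈ F s a ↔ w ∈ s ∨ Q a w) :
    ∀ (s : PySem.Set String) (w : String), w ∈ l.foldl F s ↔ w ∈ s ∨ ∃ a ∈ l, Q a w := by
  induction l with
  | nil => simp
  | cons a t ih =>
    intro s w
    simp only [List.foldl_cons, ih, hF]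
    constructor
    · rintro ((h | h) | ⟨b, hb, h⟩)
      · exact Or.inl h
      · exact Or.inr ⟨a, by simp, h⟩
      · exact Or.inr ⟨b, by simp [hb], h⟩
    · rintro (h | ⟨b, hb, h⟩)
      · exact Or.inl (Or.inl h)
      · rcases List.mem_cons.mp hb with rfl | hb
        · exact Or.inl (Or.inr h)
        · exact Or.inr ⟨b, hb, h⟩

-- the slices breed[i:j] ranged over by B's two inner loops are exactly the nonempty infixes
theorem slice_mem_char (b w : String) :
    (∃ i ∈ PySem.List.pyRange 0 (PySem.Str.len b) 1, ∃ j ∈ PySem.List.pyRange (i + 1) (PySem.Str.len b + 1) 1,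
        w = PySem.Str.slice b (some i) (some j)) ↔ w.toList ≠ [] ∧ w.toList <:+: b.toList := by
  have hbl : b.toList.length = b.length := by simp
  constructor
  · rintro ⟨i, hi, j, hj, rfl⟩
    rw [PySem.List.mem_pyRange_one] at hi hj
    simp only [PySem.Str.len_eq] at hi hj
    obtain ⟨a, rfl⟩ : ∃ a : Nat, i = (a : Int) := ⟨i.toNat, by omega⟩
    obtain ⟨c, rfl⟩ : ∃ c : Nat, j = (c : Int) := ⟨j.toNat, by omega⟩
    have ha : a < b.toList.length := by omega
    have hac : a < c := by omega
    have hcb : c ≤ b.toList.length := by omega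
    have htl : (PySem.Str.slice b (some (a : Int)) (some (c : Int))).toList
        = (b.toList.drop a).take (c - a) := by
      simp [PySem.List.slice_natCast]
    constructor
    · rw [htl]
      intro hnil
      have hlen0 := congrArg List.length hnil
      simp only [List.length_take, List.length_drop, List.length_nil] at hlen0
      omega
    · rw [htl]
      exact (List.IsPrefix.isInfix (List.take_prefix _ _)).trans
        (List.IsSuffix.isInfix (List.drop_suffix _ _))
  · rintro ⟨hne, pre, suf, hsplit⟩
    have hwpos : 0 < w.toList.length := List.length_pos_of_ne_nil hne
    have hlen : b.toList.length = pre.length + w.toList.length + suf.length := by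
      rw [← hsplit]; simp; omega
    refine ⟨(pre.length : Int), ?_, ((pre.length : Int) + (w.toList.length : Int)), ?_, ?_⟩
    · rw [PySem.List.mem_pyRange_one]
      simp only [PySem.Str.len_eq]
      omega
    · rw [PySem.List.mem_pyRange_one]
      simp only [PySem.Str.len_eq]
      omega
    · refine String.toList_inj.mp ?_
      rw [show (PySem.Str.slice b (some (pre.length : Int))
            (some ((pre.length : Int) + (w.toList.length : Int)))).toList
          = (b.toList.drop pre.length).take w.toList.length by
        simp [PySem.List.slice_natCast_add]]
      rw [← hsplit, List.append_assoc, List.drop_left]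
      exact (List.take_left' rfl).symm

theorem mem_pvAddSubs (subs : PySem.Set String) (b w : String) :
    w ∈ pvAddSubs subs b ↔ w ∈ subs ∨ (w.toList ≠ [] ∧ w.toList <:+: b.toList) := by
  unfold pvAddSubs
  rw [mem_foldl_of_step _ _
      (fun i w => ∃ j ∈ PySem.List.pyRange (i + 1) (PySem.Str.len b + 1) 1,
          w = PySem.Str.slice b (some i) (some j))
      (fun s i w => mem_foldl_of_step _ _ (fun j w => w = PySem.Str.slice b (some i) (some j))
          (fun s j w => by exact PySem.Set.mem_add _ _ _) s w)]
  rw [← slice_mem_char b w]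

theorem mem_foldl_pvAddSubs (off : List String) (w : String) :
    w ∈ off.foldl pvAddSubs PySem.Set.empty ↔
      ∃ b ∈ off, w.toList ≠ [] ∧ w.toList <:+: b.toList := by
  rw [mem_foldl_of_step off pvAddSubs (fun b w => w.toList ≠ [] ∧ w.toList <:+: b.toList)
      (fun s b w => mem_pvAddSubs s b w)]
  simp [PySem.Set.empty]

-- A's inner count for one input string is 0 iff B's any-test is false
theorem count_zero_iff_any (off : List String) (s : String) :
    ((PySem.Str.split₀ s).foldl (fun count word =>
      if word ∈ ["DOG", "CAT", "BROWN"] ∨ PySem.Str.isIn "HAIR" word then count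
      else off.foldl (fun count breed =>
        if PySem.Str.isIn word breed then count + 1 else count) count) (0 : Int) = 0)
    ↔ ((PySem.Str.split₀ s).any (fun w =>
        decide (w ∉ ["DOG", "CAT", "BROWN"]) && !PySem.Str.isIn "HAIR" w &&
          decide (w ∈ off.foldl pvAddSubs PySem.Set.empty)) = false) := by
  have hfold : (PySem.Str.split₀ s).foldl (fun count word =>
      if word ∈ ["DOG", "CAT", "BROWN"] ∨ PySem.Str.isIn "HAIR" word then count
      else off.foldl (fun count breed =>
        if PySem.Str.isIn word breed then count + 1 else count) count) (0 : Int)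
      = 0 + ((PySem.Str.split₀ s).map (pvTerm off)).sum := by
    rw [PySem.List.foldl_congr_mem
        (f := fun count word =>
          if word ∈ ["DOG", "CAT", "BROWN"] ∨ PySem.Str.isIn "HAIR" word then count
          else off.foldl (fun count breed =>
            if PySem.Str.isIn word breed then count + 1 else count) count)
        (g := fun count word => count + pvTerm off word)
        (init := (0 : Int)) (l := PySem.Str.split₀ s) ?_]
    · rw [PySem.List.foldl_add]
    · intro c w _
      show (if w ∈ ["DOG", "CAT", "BROWN"] ∨ PySem.Str.isIn "HAIR" w then c
        else off.foldl (fun count breed =>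
          if PySem.Str.isIn w breed then count + 1 else count) c) = c + pvTerm off w
      unfold pvTerm
      split
      · simp
      · rw [PySem.List.foldl_if_add_one]
  rw [hfold, zero_add, List.any_eq_false]
  have hnn : ∀ v ∈ (PySem.Str.split₀ s).map (pvTerm off), 0 ≤ v := by
    intro v hv
    simp only [List.mem_map] at hv
    obtain ⟨u, _, rfl⟩ := hv
    unfold pvTerm
    split <;> positivity
  constructor
  · intro hsum w hw hb
    have hz : pvTerm off w = 0 := by
      have h1 := hnn _ (List.mem_map.mpr ⟨w, hw, rfl⟩)
      have h2 := List.single_le_sum hnn _ (List.mem_map.mpr ⟨w, hw, rfl⟩)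
      omega
    simp only [Bool.and_eq_true, decide_eq_true_eq, Bool.not_eq_true'] at hb
    obtain ⟨⟨hskip, hhair⟩, hmem⟩ := hb
    unfold pvTerm at hz
    have hhair' : PySem.Chars.isIn ['H', 'A', 'I', 'R'] w.toList = false := by simpa using hhair
    rw [if_neg (by simp [hskip, hhair'])] at hz
    rw [mem_foldl_pvAddSubs] at hmem
    obtain ⟨b, hboff, hne, hinf⟩ := hmem
    have hcount : off.countP (fun breed => PySem.Str.isIn w breed) = 0 := by exact_mod_cast hz
    rw [List.countP_eq_zero] at hcount
    exact absurd ((PySem.Str.isIn_iff_infix w b).mpr hinf) (by simpa using hcount b hboff)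
  · intro hall
    apply List.sum_eq_zero
    intro v hv
    simp only [List.mem_map] at hv
    obtain ⟨u, hu, rfl⟩ := hv
    unfold pvTerm
    split
    · rfl
    · rename_i hnot
      rw [not_or] at hnot
      have h0 : ∀ b ∈ off, PySem.Str.isIn u b = false := by
        intro b hboff
        cases hbi : PySem.Str.isIn u b with
        | false => rfl
        | true =>
          exfalso
          have hwne := mem_split₀_ne_nil s u hu
          have hmem : u ∈ off.foldl pvAddSubs PySem.Set.empty := by
            rw [mem_foldl_pvAddSubs]
            exact ⟨b, hboff, hwne, (PySem.Str.isIn_iff_infix u b).mp hbi⟩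
          have hx := hall u hu
          rw [Bool.not_eq_true] at hx
          simp only [Bool.and_eq_false_iff, decide_eq_false_iff_not, not_not,
            Bool.not_eq_false'] at hx
          rcases hx with (h | h) | h
          · exact hnot.1 h
          · exact hnot.2 (by simpa using h)
          · exact h hmem
      have h0' : off.countP (fun breed => PySem.Str.isIn u breed) = 0 :=
        List.countP_eq_zero.mpr (by intro a ha; simpa using h0 a ha)
      exact_mod_cast h0'

-- ===== VERDICT (by name: the statement is the Claim_ definition above) =====
theorem breeds_check_spec : Claim_equal_breeds_check := by
  intro ls off _
  unfold Spec_breeds_check breeds_check breeds_check_alt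
  show (PySem.List.pyRange 0 (PySem.List.len ls) 1).foldl (fun not_breeds x =>
      if ((PySem.Str.split₀ (PySem.List.pyGetD ls x "")).foldl (fun count word =>
          if word ∈ ["DOG", "CAT", "BROWN"] ∨ PySem.Str.isIn "HAIR" word then count
          else off.foldl (fun count breed =>
            if PySem.Str.isIn word breed then count + 1 else count) count) (0 : Int)) = 0
      then not_breeds ++ [PySem.List.pyGetD ls x ""] else not_breeds) []
    = ls.filter (fun s => !(PySem.Str.split₀ s).any (fun w =>
        decide (w ∉ ["DOG", "CAT", "BROWN"]) && !PySem.Str.isIn "HAIR" w &&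
          decide (w ∈ off.foldl pvAddSubs PySem.Set.empty)))
  rw [show PySem.List.len ls = ((ls.length : Nat) : Int) by simp]
  rw [PySem.List.foldl_pyRange_zero_pyGetD' ls "" (fun not_breeds s =>
      if ((PySem.Str.split₀ s).foldl (fun count word =>
          if word ∈ ["DOG", "CAT", "BROWN"] ∨ PySem.Str.isIn "HAIR" word then count
          else off.foldl (fun count breed =>
            if PySem.Str.isIn word breed then count + 1 else count) count) (0 : Int)) = 0
      then not_breeds ++ [s] else not_breeds) []]
  rw [PySem.List.foldl_append_ite_eq_filter]
  rw [List.nil_append]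
  apply List.filter_congr
  intro s _
  cases hb : (PySem.Str.split₀ s).any (fun w =>
      decide (w ∉ ["DOG", "CAT", "BROWN"]) && !PySem.Str.isIn "HAIR" w &&
        decide (w ∈ off.foldl pvAddSubs PySem.Set.empty)) with
  | false =>
    simp only [Bool.not_false]
    exact decide_eq_true ((count_zero_iff_any off s).mpr hb)
  | true =>
    simp only [Bool.not_true]
    apply decide_eq_false
    intro hc
    have hfa := (count_zero_iff_any off s).mp hc
    rw [hb] at hfa
    cases hfa
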